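-- pv_equiv track=rewrite | github.com/kulikovanna/python_lab1 | task1.py | find_min_odd_digit
-- ===== SOURCE A (Python) =====
-- def find_min_odd_digit(number):
--     min_odd_digit = float('inf')
--     while number > 0:
--         digit = number % 10
--         if digit % 2 != 0 and digit < min_odd_digit:
--             min_odd_digit = digit
--         number //= 10
--     return min_odd_digit if min_odd_digit != float('inf') else None
-- ===== SOURCE B (Python) =====
-- def find_min_odd_digit(number):
--     if number <= 0:
--         return None
--     odds = [ord(c) - 48 for c in str(number) if (ord(c) - 48) % 2]
--     return min(odds) if odds else None
-- ===== Notes on version B (the rewrite author's own statement) =====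
-- stated objective: idiomatic
-- what changed: Replaces the arithmetic digit-extraction while-loop with a running minimum by a single string conversion, a comprehension collecting the odd digits, and one min() reduction; negatives/zero are handled by an explicit guard instead of a never-entered loop.
import Mathlib
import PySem

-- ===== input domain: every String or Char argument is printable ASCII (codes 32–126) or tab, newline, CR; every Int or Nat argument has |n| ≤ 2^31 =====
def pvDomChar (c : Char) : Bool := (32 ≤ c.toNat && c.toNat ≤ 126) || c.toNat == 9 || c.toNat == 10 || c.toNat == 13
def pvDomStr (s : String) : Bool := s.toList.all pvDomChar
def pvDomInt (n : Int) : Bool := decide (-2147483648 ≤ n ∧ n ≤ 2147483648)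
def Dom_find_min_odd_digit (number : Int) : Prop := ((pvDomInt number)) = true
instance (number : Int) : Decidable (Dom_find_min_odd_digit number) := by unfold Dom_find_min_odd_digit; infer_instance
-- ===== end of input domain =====

-- B replaces A's arithmetic while-loop with a running minimum by one string
-- conversion, a comprehension of the odd digits and a single min() reduction (objective: idiomatic).

-- ===== PORT A =====
-- termination helper for the while-loop: number //= 10 strictly shrinks a positive number
theorem pv_floordiv_ten_lt (n : Int) (h : 0 < n) :
    (PySem.Int.floordiv n 10).toNat < n.toNat := by
  rw [PySem.Int.floordiv_eq_ediv_of_pos (by norm_num)]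
  omega

def find_min_odd_digit_go (number : Int) (min_odd_digit : Option Int) : Option Int :=
  if h : number > 0 then
    let digit := PySem.Int.mod number 10
    let min_odd_digit' :=
      if PySem.Int.mod digit 2 ≠ 0 ∧ (∀ v ∈ min_odd_digit, digit < v) then some digit
      else min_odd_digit
    find_min_odd_digit_go (PySem.Int.floordiv number 10) min_odd_digit'
  else min_odd_digit
termination_by number.toNat
decreasing_by exact pv_floordiv_ten_lt number h

-- min_odd_digit = float('inf') is modelled as none: 'digit < inf' is always true,
-- and the final 'return m if m != inf else None' is the identity on this model.
def find_min_odd_digit (number : Int) : Option Int :=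
  find_min_odd_digit_go number none

-- ===== PORT B =====
def find_min_odd_digit_alt (number : Int) : Option Int :=
  if number ≤ 0 then none
  else
    let odds := (((PySem.Int.toStr number).toList.filter
        (fun c => PySem.Int.mod ((c.toNat : Int) - 48) 2 ≠ 0)).map
        (fun c => ((c.toNat : Int) - 48)))
    if odds.isEmpty then none else PySem.List.min? odds (fun x => x)

-- ===== PRECONDITION & SPEC =====
def Spec_find_min_odd_digit (number : Int) (out : Option Int) : Prop := out = find_min_odd_digit_alt number
instance (number : Int) (out : Option Int) : Decidable (Spec_find_min_odd_digit number out) := by unfold Spec_find_min_odd_digit; infer_instance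

-- ===== CLAIM (what is proved, stated in full; the proofs are below) =====
def Claim_equal_find_min_odd_digit : Prop := ∀ (number : Int), Dom_find_min_odd_digit number → Spec_find_min_odd_digit number (find_min_odd_digit number)

-- ===== LEMMAS AND PROOFS =====

-- A's loop step on one digit
def pvStep (m : Option Int) (d : Int) : Option Int :=
  if PySem.Int.mod d 2 ≠ 0 ∧ (∀ v ∈ m, d < v) then some d else m

-- A's loop is the fold of pvStep over the little-endian digit list
theorem go_eq_foldl (n : Nat) (m : Option Int) :
    find_min_odd_digit_go (n : Int) m =
      ((Nat.digits 10 n).map (fun k : Nat => (k : Int))).foldl pvStep m := by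
  induction n using Nat.strong_induction_on generalizing m with
  | _ n ih =>
    rcases Nat.eq_zero_or_pos n with h0 | hpos
    · subst h0; rw [find_min_odd_digit_go]; simp
    · rw [find_min_odd_digit_go]
      have hgt : (n : Int) > 0 := by exact_mod_cast hpos
      rw [dif_pos hgt]
      have h1 : PySem.Int.mod (n : Int) 10 = ((n % 10 : Nat) : Int) := by
        exact_mod_cast PySem.Int.mod_natCast n 10
      have h2 : PySem.Int.floordiv (n : Int) 10 = ((n / 10 : Nat) : Int) := by
        exact_mod_cast PySem.Int.floordiv_natCast n 10
      simp only [h1, h2]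
      rw [ih (n / 10) (Nat.div_lt_self hpos (by norm_num))]
      rw [Nat.digits_def' (by norm_num : 1 < 10) hpos]
      simp [pvStep]

-- unconditional min-merge step
def pvMin (m : Option Int) (d : Int) : Option Int :=
  some (match m with | none => d | some v => min v d)

theorem pvStep_eq (m : Option Int) (d : Int) :
    pvStep m d = if PySem.Int.mod d 2 ≠ 0 then pvMin m d else m := by
  by_cases ho : PySem.Int.mod d 2 ≠ 0
  · cases m with
    | none => simp [pvStep, pvMin, ho]
    | some v =>
      by_cases hlt : d < v
      · simp [pvStep, pvMin, ho, hlt, min_eq_right (le_of_lt hlt)]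
      · simp [pvStep, pvMin, ho, hlt, min_eq_left (by omega : v ≤ d)]
  · have ho2 : ¬ (PySem.Int.mod d 2 ≠ 0 ∧ (∀ v ∈ m, d < v)) := fun hc => ho hc.1
    rw [pvStep, if_neg ho2, if_neg ho]

theorem foldl_pvStep_eq_filter (l : List Int) (m : Option Int) :
    l.foldl pvStep m =
      (l.filter (fun d => decide (PySem.Int.mod d 2 ≠ 0))).foldl pvMin m := by
  induction l generalizing m with
  | nil => rfl
  | cons x t ih =>
    simp only [List.foldl_cons, List.filter_cons]
    rw [pvStep_eq]
    by_cases h : x % 2 = 1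
    · simp [h, ih]
    · simp [h, ih]

theorem foldl_pvMin_some (l : List Int) (v : Int) :
    l.foldl pvMin (some v) = some (l.foldl min v) := by
  induction l generalizing v with
  | nil => rfl
  | cons x t ih => simp [pvMin, ih]

theorem foldl_pvMin_none (l : List Int) :
    l.foldl pvMin none = match l with
      | [] => none
      | x :: t => some (t.foldl min x) := by
  cases l with
  | nil => rfl
  | cons x t => simp [pvMin, foldl_pvMin_some]

-- fold min over permuted lists, same accumulator
theorem foldl_min_perm {l l' : List Int} (h : l.Perm l') (v : Int) :
    l.foldl min v = l'.foldl min v :=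
  h.foldl_eq' (fun x _ y _ z => by rw [min_right_comm]) v

theorem foldl_min_acc (l : List Int) (a b : Int) :
    l.foldl min (min a b) = min a (l.foldl min b) := by
  induction l generalizing b with
  | nil => rfl
  | cons c u ih => simp only [List.foldl_cons]; rw [min_assoc, ih]

-- minimum of a nonempty list depends only on the multiset of elements
theorem foldl_min_of_perm_cons {x y : Int} {t s : List Int}
    (h : (x :: t).Perm (y :: s)) : t.foldl min x = s.foldl min y := by
  have h1 : t.foldl min x = min x (s.foldl min y) := by
    have hx : t.foldl min x = (x :: t).foldl min x := by
      simp [List.foldl_cons, min_self]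
    rw [hx, foldl_min_perm h x]
    simp only [List.foldl_cons]
    exact foldl_min_acc s x y
  have h2 : s.foldl min y = min y (t.foldl min x) := by
    have hy : s.foldl min y = (y :: s).foldl min y := by
      simp [List.foldl_cons, min_self]
    rw [hy, foldl_min_perm h.symm y]
    simp only [List.foldl_cons]
    exact foldl_min_acc t y x
  exact le_antisymm (h1 ▸ min_le_right x _) (h2 ▸ min_le_right y _)

-- Nat.toDigitsCore is the big-endian digit list (characterisation with enough fuel)
theorem toDigitsCore_eq (f : Nat) : ∀ (n : Nat) (rest : List Char), n < f →
    Nat.toDigitsCore 10 f n rest =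
      (if n = 0 then ['0'] else ((Nat.digits 10 n).map Nat.digitChar).reverse) ++ rest := by
  induction f with
  | zero => intro n rest h; omega
  | succ f ih =>
    intro n rest h
    rw [Nat.toDigitsCore]
    rcases Nat.eq_zero_or_pos n with h0 | hpos
    · subst h0; simp; decide
    · by_cases hdiv : n / 10 = 0
      · simp only [hdiv, if_pos rfl]
        have hn10 : n < 10 := by omega
        rw [Nat.digits_def' (by norm_num : 1 < 10) hpos,
          Nat.div_eq_of_lt hn10, Nat.digits_zero]
        simp [Nat.mod_eq_of_lt hn10, hpos.ne']
      · simp only [hdiv, if_neg hdiv]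
        rw [ih (n / 10) _ (by omega)]
        rw [Nat.digits_def' (by norm_num : 1 < 10) hpos]
        simp [hdiv, hpos.ne']

theorem toDigits_eq (n : Nat) (h : 0 < n) :
    Nat.toDigits 10 n = ((Nat.digits 10 n).map Nat.digitChar).reverse := by
  rw [Nat.toDigits, toDigitsCore_eq (n + 1) n [] (by omega)]
  simp [h.ne']

theorem digitChar_val (k : Nat) (h : k < 10) :
    (((Nat.digitChar k).toNat : Int) - 48) = (k : Int) := by
  interval_cases k <;> decide

-- main positive case
theorem main_pos (n : Nat) (h : 0 < n) :
    find_min_odd_digit_go (n : Int) none = find_min_odd_digit_alt (n : Int) := by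
  have hne : ¬ ((n : Int) ≤ 0) := by exact_mod_cast Nat.not_le.mpr h
  rw [go_eq_foldl, foldl_pvStep_eq_filter]
  unfold find_min_odd_digit_alt
  rw [if_neg hne, PySem.Int.toList_toStr]
  simp only [PySem.Int.toChars]
  rw [if_neg (by omega : ¬ (n : Int) < 0), Int.toNat_natCast, toDigits_eq n h]
  have hlt : ∀ k ∈ Nat.digits 10 n, k < 10 :=
    fun k hk => Nat.digits_lt_base (by norm_num) hk
  set dl := Nat.digits 10 n with hdl
  have key : ∀ (l : List Nat), (∀ k ∈ l, k < 10) →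
      ((l.map Nat.digitChar).filter
          (fun c => decide (PySem.Int.mod ((c.toNat : Int) - 48) 2 ≠ 0))).map
          (fun c => ((c.toNat : Int) - 48))
        = (l.map (fun k : Nat => (k : Int))).filter
          (fun d => decide (PySem.Int.mod d 2 ≠ 0)) := by
    intro l hl
    induction l with
    | nil => rfl
    | cons k u ih =>
      have hk : k < 10 := hl k List.mem_cons_self
      have hv := digitChar_val k hk
      have ih' := ih (fun j hj => hl j (List.mem_cons_of_mem k hj))
      simp only [List.map_cons, List.filter_cons, hv]
      by_cases hodd : (k : Int) % 2 = 1
      · simp [hodd, hv]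
        simpa using ih'
      · simp [hodd, hv]
        simpa using ih'
  have hmapfil := key dl.reverse (fun k hk => hlt k (List.mem_reverse.mp hk))
  rw [List.map_reverse] at hmapfil
  rw [hmapfil, foldl_pvMin_none]
  have hperm : ((dl.map (fun k : Nat => (k : Int))).filter (fun d => decide (PySem.Int.mod d 2 ≠ 0))).Perm
      ((List.map (fun k : Nat => (k : Int)) dl.reverse).filter (fun d => decide (PySem.Int.mod d 2 ≠ 0))) := by
    apply List.Perm.filter
    exact ((dl.reverse_perm).map (fun k : Nat => (k : Int))).symm
  rcases hA : (dl.map (fun k : Nat => (k : Int))).filter (fun d => decide (PySem.Int.mod d 2 ≠ 0)) with _ | ⟨x, t⟩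
  · rw [hA] at hperm
    have hB0 : ((List.map (fun k : Nat => (k : Int)) dl.reverse).filter (fun d => decide (PySem.Int.mod d 2 ≠ 0))) = [] :=
      hperm.symm.eq_nil
    rw [hB0]
    simp
  · rw [hA] at hperm
    rcases hB : (List.map (fun k : Nat => (k : Int)) dl.reverse).filter (fun d => decide (PySem.Int.mod d 2 ≠ 0)) with _ | ⟨y, s⟩
    · rw [hB] at hperm
      exact absurd hperm.eq_nil (by simp)
    · rw [hB] at hperm
      rw [if_neg (by simp), PySem.List.min?_id_cons]
      exact congrArg some (foldl_min_of_perm_cons hperm)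

-- ===== VERDICT (by name: the statement is the Claim_ definition above) =====
theorem find_min_odd_digit_spec : Claim_equal_find_min_odd_digit := by
  intro number _
  unfold Spec_find_min_odd_digit
  rcases le_or_gt number 0 with hle | hgt
  · rw [find_min_odd_digit, find_min_odd_digit_go, dif_neg (by omega)]
    unfold find_min_odd_digit_alt
    rw [if_pos hle]
  · have hcast : number = ((number.toNat : Nat) : Int) := by omega
    rw [find_min_odd_digit, hcast]
    exact main_pos number.toNat (by omega)
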